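-- pv_equiv track=rewrite | github.com/mortimerliu/LeetCode | algorithms/python/easy/914.XOfAKindInADeckOfCards.py | hasGroupsSizeX
-- ===== SOURCE A (Python) =====
-- from typing import List
--
-- from collections import Counter
--
-- def hasGroupsSizeX(deck: List[int]) -> bool:
--     """
--     Solution 1: Hashmap + GCA
--
--     Count all the numbers in the deck and store them in a hashmap.
--     Find the greatest common divisor of all the counts.
--
--     Time:
--     """
--
--     def gca(a, b):
--         """calcualte the greatest common divisor of a and b
--
--         Time: O(log(min(a, b)))
--         Space: O(1)
--         """
--         if b == 0:
--             return a
--         return gca(b, a % b)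
--
--     count = Counter(deck)
--     curr_gcd = None
--     for key in count:
--         if curr_gcd is None:
--             curr_gcd = count[key]
--         else:
--             curr_gcd = gca(curr_gcd, count[key])
--         if curr_gcd == 1:
--             return False
--     return True
-- ===== SOURCE B (Python) =====
-- from typing import List
-- from collections import Counter
--
-- def hasGroupsSizeX(deck: List[int]) -> bool:
--     # Trial division over candidate group sizes instead of GCD folding.
--     count = Counter(deck)
--     if len(count) == 0:
--         return True
--     m = min(count.values())
--     for d in range(2, m + 1):
--         if all(c % d == 0 for c in count.values()):
--             return True
--     return False
-- ===== Notes on version B (the rewrite author's own statement) =====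
-- stated objective: alternative
-- what changed: Replaces the recursive Euclidean-GCD fold over the counts (with early exit at gcd 1) by trial division: try every candidate group size d from 2 up to the minimum count and test whether d divides all counts.
import Mathlib
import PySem

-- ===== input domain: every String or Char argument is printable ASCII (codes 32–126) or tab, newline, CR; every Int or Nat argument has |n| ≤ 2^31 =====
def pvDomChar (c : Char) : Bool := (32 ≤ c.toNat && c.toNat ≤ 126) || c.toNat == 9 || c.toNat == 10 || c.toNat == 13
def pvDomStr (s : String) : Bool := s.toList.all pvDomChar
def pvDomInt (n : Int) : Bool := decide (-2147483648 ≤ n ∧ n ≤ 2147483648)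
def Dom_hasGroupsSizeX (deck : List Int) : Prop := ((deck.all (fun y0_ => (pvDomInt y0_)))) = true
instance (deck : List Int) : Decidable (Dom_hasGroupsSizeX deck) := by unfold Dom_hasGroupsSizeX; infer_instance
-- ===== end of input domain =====

-- B replaces A's Euclidean-GCD fold over the counts by trial division over candidate
-- group sizes 2..min(counts); same return value on every deck.

-- ===== PORT A =====
-- helper gca(a, b): Euclidean gcd with Python's % (floor mod)
def pyGca (a b : Int) : Int :=
  if b = 0 then a else pyGca b (PySem.Int.mod a b)
termination_by b.natAbs
decreasing_by
  rename_i hb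
  rcases lt_or_gt_of_ne hb with h | h
  · have := PySem.Int.mod_neg_bounds a h
    omega
  · have h1 := PySem.Int.mod_nonneg a h
    have h2 := PySem.Int.mod_lt a h
    omega

-- the 'for key in count' loop with early 'return False'; count[key] never raises
-- (every key iterated is present), so it is ported as getD k 0
def hasGroupsSizeXGo (count : PySem.Dict Int Int) (keys : List Int) (curr : Option Int) : Bool :=
  match keys with
  | [] => true
  | k :: ks =>
    let g := match curr with
      | none => count.getD k 0
      | some g0 => pyGca g0 (count.getD k 0)
    if g = 1 then false else hasGroupsSizeXGo count ks (some g)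

def hasGroupsSizeX (deck : List Int) : Bool :=
  let count := PySem.Dict.counter deck
  hasGroupsSizeXGo count count.keys none

-- ===== PORT B =====
def hasGroupsSizeX_alt (deck : List Int) : Bool :=
  let count := PySem.Dict.counter deck
  if count.size = 0 then true
  else
    let m := (PySem.List.min? count.values (fun c => c)).getD 0
    (PySem.List.pyRange 2 (m + 1) 1).any
      (fun d => count.values.all (fun c => PySem.Int.mod c d == 0))

-- ===== PRECONDITION & SPEC =====
def Spec_hasGroupsSizeX (deck : List Int) (out : Bool) : Prop := out = hasGroupsSizeX_alt deck
instance (deck : List Int) (out : Bool) : Decidable (Spec_hasGroupsSizeX deck out) := by unfold Spec_hasGroupsSizeX; infer_instance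

-- ===== CLAIM (what is proved, stated in full; the proofs are below) =====
def Claim_equal_hasGroupsSizeX : Prop := ∀ (deck : List Int), Dom_hasGroupsSizeX deck → Spec_hasGroupsSizeX deck (hasGroupsSizeX deck)

-- ===== LEMMAS AND PROOFS =====

-- the gcd fold of A, as an Int-valued fold
def gcdFold (g : Int) (cs : List Int) : Int :=
  cs.foldl (fun x c => (Int.gcd x c : Int)) g

-- A's loop, re-expressed over the list of looked-up count values
def loopVals (cs : List Int) (curr : Option Int) : Bool :=
  match cs with
  | [] => true
  | c :: cs =>
    let g := match curr with
      | none => c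
      | some g0 => pyGca g0 c
    if g = 1 then false else loopVals cs (some g)

theorem go_eq_loopVals (count : PySem.Dict Int Int) (keys : List Int) (curr : Option Int) :
    hasGroupsSizeXGo count keys curr = loopVals (keys.map (fun k => count.getD k 0)) curr := by
  induction keys generalizing curr with
  | nil => rfl
  | cons k ks ih =>
    simp only [hasGroupsSizeXGo, loopVals, List.map_cons]
    split <;> simp_all

theorem pyGca_eq_gcd_aux : ∀ (n : Nat) (b a : Int), b.natAbs = n → 0 ≤ a → 0 ≤ b →
    pyGca a b = Int.gcd a b := by
  intro n
  induction n using Nat.strong_induction_on with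
  | _ n ih =>
    intro b a hn ha hb
    by_cases h0 : b = 0
    · subst h0
      rw [pyGca]
      simp [Int.gcd, Int.natAbs_of_nonneg ha]
    · have hbpos : 0 < b := lt_of_le_of_ne hb (Ne.symm h0)
      rw [pyGca, if_neg h0, PySem.Int.mod_eq_emod_of_pos hbpos]
      have h1 : 0 ≤ a % b := Int.emod_nonneg a h0
      have h2 : a % b < b := Int.emod_lt_of_pos a hbpos
      rw [ih (a % b).natAbs (by omega) (a % b) b rfl hb h1]
      have hcast : a % b = ((a.natAbs % b.natAbs : Nat) : Int) := by
        rw [Int.natCast_mod, Int.natAbs_of_nonneg ha, Int.natAbs_of_nonneg hbpos.le]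
      norm_cast
      unfold Int.gcd
      rw [hcast, Int.natAbs_natCast, Nat.gcd_comm]
      conv_rhs => rw [Nat.gcd_comm, Nat.gcd_rec]

theorem pyGca_eq_gcd (a b : Int) (ha : 0 ≤ a) (hb : 0 ≤ b) : pyGca a b = Int.gcd a b :=
  pyGca_eq_gcd_aux b.natAbs b a rfl ha hb

theorem gcdFold_one (cs : List Int) : gcdFold 1 cs = 1 := by
  induction cs with
  | nil => rfl
  | cons c cs ih => simpa [gcdFold, Int.gcd] using ih

theorem gcdFold_pos (cs : List Int) : ∀ g : Int, 1 ≤ g → 1 ≤ gcdFold g cs := by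
  induction cs with
  | nil => intro g hg; simpa [gcdFold] using hg
  | cons c cs ih =>
    intro g hg
    simp only [gcdFold, List.foldl_cons]
    apply ih
    have : Int.gcd g c ≠ 0 := by
      simp [Int.gcd_eq_zero_iff]
      intro h; omega
    omega

theorem gcdFold_dvd_init (cs : List Int) : ∀ g : Int, (gcdFold g cs) ∣ g := by
  induction cs with
  | nil => intro g; simp [gcdFold]
  | cons c cs ih =>
    intro g
    simp only [gcdFold, List.foldl_cons]
    exact dvd_trans (ih _) (Int.gcd_dvd_left g c)

theorem gcdFold_dvd_mem (cs : List Int) : ∀ g : Int, ∀ v ∈ cs, (gcdFold g cs) ∣ v := by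
  induction cs with
  | nil => intro g v hv; simp at hv
  | cons c cs ih =>
    intro g v hv
    simp only [gcdFold, List.foldl_cons]
    rcases List.mem_cons.mp hv with h | h
    · subst h
      exact dvd_trans (gcdFold_dvd_init cs _) (Int.gcd_dvd_right g v)
    · exact ih _ v h

theorem gcdFold_greatest (cs : List Int) : ∀ g d : Int, d ∣ g → (∀ v ∈ cs, d ∣ v) → d ∣ gcdFold g cs := by
  induction cs with
  | nil => intro g d hg _; simpa [gcdFold] using hg
  | cons c cs ih =>
    intro g d hg hall
    simp only [gcdFold, List.foldl_cons]
    apply ih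
    · exact Int.natAbs_dvd.mp (Int.natCast_dvd_natCast.mpr
        (Nat.dvd_gcd (Int.natAbs_dvd_natAbs.mpr hg) (Int.natAbs_dvd_natAbs.mpr (hall c (by simp)))))
    · intro v hv; exact hall v (List.mem_cons_of_mem _ hv)

theorem loopVals_some (cs : List Int) :
    ∀ g : Int, 2 ≤ g → (∀ c ∈ cs, 1 ≤ c) →
      loopVals cs (some g) = decide (gcdFold g cs ≠ 1) := by
  induction cs with
  | nil =>
    intro g hg _
    simp only [loopVals, gcdFold, List.foldl_nil]
    simp
    omega
  | cons c cs ih =>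
    intro g hg hall
    have hc : (1:Int) ≤ c := hall c (by simp)
    have hstep : gcdFold g (c :: cs) = gcdFold ((Int.gcd g c : Int)) cs := rfl
    simp only [loopVals]
    rw [pyGca_eq_gcd g c (by omega) (by omega)]
    have hgcd1 : 1 ≤ (Int.gcd g c : Int) := by
      have : Int.gcd g c ≠ 0 := by
        simp [Int.gcd_eq_zero_iff]; intro h; omega
      omega
    by_cases h1 : ((Int.gcd g c : Int)) = 1
    · rw [if_pos h1]
      have hone : gcdFold g (c :: cs) = 1 := by rw [hstep, h1]; exact gcdFold_one cs
      simp [hone]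
    · rw [if_neg h1, ih _ (by omega) (fun x hx => hall x (List.mem_cons_of_mem _ hx))]
      rw [hstep]

theorem loopA_char (c : Int) (cs : List Int) (hall : ∀ v ∈ c :: cs, 1 ≤ v) :
    loopVals (c :: cs) none = decide (gcdFold c cs ≠ 1) := by
  have hc : (1:Int) ≤ c := hall c (by simp)
  simp only [loopVals]
  by_cases h1 : c = 1
  · rw [if_pos h1]
    have : gcdFold c cs = 1 := by rw [h1]; exact gcdFold_one cs
    simp [this]
  · rw [if_neg h1, loopVals_some cs c (by omega) (fun x hx => hall x (List.mem_cons_of_mem _ hx))]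

-- B's trial-division body over a values list, characterised as an existential
theorem anyDiv_iff (vs : List Int) (m : Int) :
    ((PySem.List.pyRange 2 (m + 1) 1).any
        (fun d => vs.all (fun c => PySem.Int.mod c d == 0)) = true)
      ↔ ∃ d : Int, 2 ≤ d ∧ d ≤ m ∧ ∀ v ∈ vs, d ∣ v := by
  simp only [List.any_eq_true, PySem.List.mem_pyRange_one, List.all_eq_true, beq_iff_eq,
    PySem.Int.mod_eq_zero_iff_dvd]
  constructor
  · rintro ⟨d, ⟨h1, h2⟩, h3⟩; exact ⟨d, h1, by omega, h3⟩
  · rintro ⟨d, h1, h2, h3⟩; exact ⟨d, ⟨h1, by omega⟩, h3⟩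

-- the central equivalence on an arbitrary nonempty list of positive values
theorem core (c : Int) (cs : List Int) (m : Int)
    (hall : ∀ v ∈ c :: cs, 1 ≤ v)
    (hmem : m ∈ c :: cs) :
    loopVals (c :: cs) none
      = ((PySem.List.pyRange 2 (m + 1) 1).any
          (fun d => (c :: cs).all (fun v => PySem.Int.mod v d == 0))) := by
  have hc : (1:Int) ≤ c := hall c (by simp)
  have key : (gcdFold c cs ≠ 1) ↔ (∃ d : Int, 2 ≤ d ∧ d ≤ m ∧ ∀ v ∈ c :: cs, d ∣ v) := by
    constructor
    · intro hne
      have hpos := gcdFold_pos cs c hc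
      refine ⟨gcdFold c cs, by omega, ?_, ?_⟩
      · have hdm : gcdFold c cs ∣ m := by
          rcases List.mem_cons.mp hmem with h | h
          · rw [h]; exact gcdFold_dvd_init cs c
          · exact gcdFold_dvd_mem cs c m h
        exact Int.le_of_dvd (by have := hall m hmem; omega) hdm
      · intro v hv
        rcases List.mem_cons.mp hv with h | h
        · rw [h]; exact gcdFold_dvd_init cs c
        · exact gcdFold_dvd_mem cs c v h
    · rintro ⟨d, hd2, _, hdall⟩
      have hdg : d ∣ gcdFold c cs :=
        gcdFold_greatest cs c d (hdall c (by simp))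
          (fun v hv => hdall v (List.mem_cons_of_mem _ hv))
      have hpos := gcdFold_pos cs c hc
      have := Int.le_of_dvd (by omega) hdg
      omega
  rw [loopA_char c cs hall]
  rw [Bool.eq_iff_iff]
  rw [anyDiv_iff]
  simp only [decide_eq_true_eq]
  exact key

-- values of Counter deck are positive, and the values list determines both ports
theorem values_counter_pos (deck : List Int) :
    ∀ v ∈ (PySem.Dict.counter deck : PySem.Dict Int Int).values, 1 ≤ v := by
  intro v hv
  simp only [PySem.Dict.values, PySem.Dict.items_counter, List.map_map, List.mem_map] at hv
  obtain ⟨k, hk, rfl⟩ := hv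
  have : k ∈ deck := (PySem.Set.mem_ofList deck k).mp hk
  have : 0 < deck.count k := List.count_pos_iff.mpr this
  simp only [Function.comp]
  exact_mod_cast this

theorem hasGroupsSizeX_spec' : ∀ (deck : List Int), hasGroupsSizeX deck = hasGroupsSizeX_alt deck := by
  intro deck
  unfold hasGroupsSizeX hasGroupsSizeX_alt
  rw [go_eq_loopVals]
  rw [← PySem.Dict.values_eq_map_keys _ (PySem.Dict.nodup_keys_counter deck) 0]
  have hpos := values_counter_pos deck
  cases hv : (PySem.Dict.counter deck : PySem.Dict Int Int).values with
  | nil =>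
    have hsz : (PySem.Dict.counter deck : PySem.Dict Int Int).size = 0 := by
      simp only [PySem.Dict.size, PySem.Dict.values] at hv ⊢
      simpa using congrArg List.length hv
    rw [if_pos hsz]
    rfl
  | cons c cs =>
    have hsz : (PySem.Dict.counter deck : PySem.Dict Int Int).size ≠ 0 := by
      simp only [PySem.Dict.size, PySem.Dict.values] at hv ⊢
      have := congrArg List.length hv
      simp at this
      omega
    rw [if_neg hsz]
    obtain ⟨m, hm⟩ : ∃ m, PySem.List.min? (c :: cs) (fun x => x) = some m := by
      cases h : PySem.List.min? (c :: cs) (fun x => x) with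
      | none => exact absurd ((PySem.List.min?_eq_none_iff _ _).mp h) (by simp)
      | some m => exact ⟨m, rfl⟩
    rw [hv, hm]
    have hmem := PySem.List.min?_mem hm
    exact core c cs m (by rw [← hv]; exact hpos) hmem

-- ===== VERDICT (by name: the statement is the Claim_ definition above) =====
theorem hasGroupsSizeX_spec : Claim_equal_hasGroupsSizeX := by
  intro deck _
  unfold Spec_hasGroupsSizeX
  exact hasGroupsSizeX_spec' deck
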